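-- pv_equiv track=rewrite | github.com/shivakr07/datastructure | June/try.py | convert_and_sort
-- ===== SOURCE A (Python) =====
-- def convert_and_sort(N):
--     char_map = {
--         '1': 'A','2': 'B','3': 'C','4': 'D','5': 'E','6': 'F','7': 'G','8': 'H','9': 'I'
--     }
--
--     digits = [char_map[digit] for digit in str(N)]
--     sorted_chars = sorted(digits)
--     S = ''.join(sorted_chars)
--
--     return S
-- ===== SOURCE B (Python) =====
-- def convert_and_sort(N):
--     digits = "123456789"
--     counts = [0] * 9
--     for ch in str(N):
--         counts[digits.index(ch)] += 1  # ValueError on chars outside '1'..'9' (A raises KeyError there)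
--     out = []
--     for i in range(9):
--         out.append(chr(ord('A') + i) * counts[i])
--     return ''.join(out)
-- ===== Notes on version B (the rewrite author's own statement) =====
-- stated objective: alternative
-- what changed: Replaces the dict mapping plus comparison sort by a counting sort: a 9-slot frequency array indexed with digits.index(ch) is filled in one pass over str(N), then letters A..I are emitted count-many times in alphabet order.
import Mathlib
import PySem

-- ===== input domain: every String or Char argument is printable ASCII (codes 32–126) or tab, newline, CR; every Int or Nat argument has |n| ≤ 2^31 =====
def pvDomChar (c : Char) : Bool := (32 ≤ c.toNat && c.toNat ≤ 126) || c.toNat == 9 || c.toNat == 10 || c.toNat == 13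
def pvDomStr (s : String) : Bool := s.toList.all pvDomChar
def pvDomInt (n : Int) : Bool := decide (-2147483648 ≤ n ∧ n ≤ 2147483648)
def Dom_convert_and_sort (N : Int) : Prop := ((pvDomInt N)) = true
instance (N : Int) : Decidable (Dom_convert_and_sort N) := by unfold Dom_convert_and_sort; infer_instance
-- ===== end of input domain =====

-- B replaces A's dict-map + comparison sort by a counting sort over a fixed 9-slot
-- frequency array (objective: alternative; asymptotically lighter, not measurable here).


-- ===== PORT A =====
def pvCharMapA : PySem.Dict Char String :=
  PySem.Dict.ofList [('1',"A"),('2',"B"),('3',"C"),('4',"D"),('5',"E"),('6',"F"),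
                     ('7',"G"),('8',"H"),('9',"I")]

def convert_and_sort (N : Int) : String :=
  -- char_map[digit] raises KeyError on chars outside '1'..'9'; those inputs are outside
  -- Pre_, so the .getD "" default is never reached on admitted inputs.
  let digits : List String :=
    (PySem.Int.toChars N).map (fun digit => ((pvCharMapA.get? digit).getD ""))
  let sorted_chars := PySem.List.sorted digits (fun x => x) false
  PySem.Str.join "" sorted_chars

-- ===== PORT B =====
def pvDigitsB : List Char := "123456789".toList

-- counts[digits.index(ch)] += 1; digits.index raises ValueError on chars outside
-- '1'..'9' (outside Pre_), so find's -1 default is never reached on admitted inputs.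
def pvStepB (counts : List Int) (ch : Char) : List Int :=
  let i := PySem.Chars.find pvDigitsB [ch]
  counts.set i.toNat ((PySem.List.pyGet? counts i).getD 0 + 1)

def convert_and_sort_alt (N : Int) : String :=
  let counts := (PySem.Int.toChars N).foldl pvStepB (List.replicate 9 0)
  -- for i in range(9): out.append(chr(ord('A') + i) * counts[i]); return ''.join(out)
  let out := (PySem.List.pyRange 0 9 1).map
    (fun i => String.ofList (List.replicate ((PySem.List.pyGet? counts i).getD 0).toNat
      (Char.ofNat (65 + i).toNat)))
  PySem.Str.join "" out

-- ===== PRECONDITION & SPEC =====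
-- Pre_ excludes exactly the inputs where A raises KeyError: any N whose str() contains a
-- character outside '1'..'9' (i.e. N ≤ 0 or N has a digit 0); B raises ValueError there.
def Pre_convert_and_sort (N : Int) : Prop :=
  ((PySem.Int.toChars N).all
    (fun c => ['1','2','3','4','5','6','7','8','9'].contains c)) = true
instance (N : Int) : Decidable (Pre_convert_and_sort N) := by
  unfold Pre_convert_and_sort; infer_instance
def pvWitness_convert_and_sort : Int := (312)

def Spec_convert_and_sort (N : Int) (out : String) : Prop := out = convert_and_sort_alt N
instance (N : Int) (out : String) : Decidable (Spec_convert_and_sort N out) := by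
  unfold Spec_convert_and_sort; infer_instance

-- ===== CLAIM (what is proved, stated in full; the proofs are below) =====
def Claim_equal_convert_and_sort : Prop :=
  ∀ (N : Int), Dom_convert_and_sort N → Pre_convert_and_sort N →
    Spec_convert_and_sort N (convert_and_sort N)

-- ===== LEMMAS AND PROOFS =====

def pvLetters : List String := ["A","B","C","D","E","F","G","H","I"]

-- Chars.join with the empty separator is flatten.
theorem pv_chars_join_nil (l : List (List Char)) : PySem.Chars.join [] l = l.flatten := by
  induction l with
  | nil => rfl
  | cons a rest ih =>
      cases rest with
      | nil => simp [PySem.Chars.join, List.intercalate, List.intersperse]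
      | cons b r => simpa [PySem.Chars.join_cons_cons] using ih

theorem pv_flatten_flatten (L : List (List (List Char))) :
    L.flatten.flatten = (L.map List.flatten).flatten := by
  induction L with
  | nil => rfl
  | cons a r ih => simp [ih]

-- ''.join distributes over the blocks of a flatMap.
theorem pv_join_flatMap (ls : List String) (g : String → List String) :
    PySem.Str.join "" (ls.flatMap g)
      = PySem.Str.join "" (ls.map fun L => PySem.Str.join "" (g L)) := by
  apply String.ext
  simp only [PySem.Str.toList_join]
  have h : ("" : String).toList = [] := rfl
  rw [h, pv_chars_join_nil, pv_chars_join_nil]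
  simp [List.flatMap_def, List.map_map, Function.comp_def, pv_flatten_flatten,
        pv_chars_join_nil]

-- blocks of replicates over a ≤-sorted alphabet are ≤-sorted
theorem pv_pairwise_flatMap (ls : List String) (f : String → Nat)
    (h : ls.Pairwise (· ≤ ·)) :
    (ls.flatMap (fun L => List.replicate (f L) L)).Pairwise (fun a b => a ≤ b) := by
  induction ls with
  | nil => simp
  | cons L rest ih =>
      obtain ⟨h1, h2⟩ := List.pairwise_cons.mp h
      simp only [List.flatMap_cons]
      rw [List.pairwise_append]
      refine ⟨List.pairwise_replicate.mpr (Or.inr le_rfl), ih h2, ?_⟩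
      intro x hx y hy
      obtain rfl := List.eq_of_mem_replicate hx
      obtain ⟨L', hL', hy'⟩ := List.mem_flatMap.mp hy
      obtain rfl := List.eq_of_mem_replicate hy'
      exact h1 _ hL'

theorem pv_count_flatMap (ls : List String) (hnd : ls.Nodup) (f : String → Nat)
    (a : String) :
    (ls.flatMap (fun L => List.replicate (f L) L)).count a
      = if a ∈ ls then f a else 0 := by
  induction ls with
  | nil => simp
  | cons L rest ih =>
      obtain ⟨hL, hnd'⟩ := List.nodup_cons.mp hnd
      simp only [List.flatMap_cons, List.count_append, List.count_replicate,
                 List.mem_cons, ih hnd']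
      by_cases h : a = L
      · subst h
        simp
        intro hmem
        exact absurd hmem hL
      · simp [h, Ne.symm h]

-- the characterisation of Python's sorted on a list whose elements come from pvLetters
theorem pv_sorted_eq (xs : List String) (h : ∀ x ∈ xs, x ∈ pvLetters) :
    PySem.List.sorted xs (fun x => x) false
      = pvLetters.flatMap (fun L => List.replicate (xs.count L) L) := by
  apply PySem.List.sorted_id_eq_of_perm_of_pairwise
  · rw [List.perm_iff_count]
    intro a
    rw [pv_count_flatMap _ (by decide) _ a]
    by_cases hm : a ∈ pvLetters
    · simp [hm]
    · simp only [hm, if_false]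
      exact (List.count_eq_zero.mpr fun hx => hm (h a hx)).symm
  · refine pv_pairwise_flatMap _ _ ?_
    simp [pvLetters, String.le_iff_toList_le]
    decide

theorem pv_map_mem (c : Char) (hc : c ∈ ['1','2','3','4','5','6','7','8','9']) :
    ((pvCharMapA.get? c).getD "") ∈ pvLetters := by
  fin_cases hc <;> decide

-- B's frequency fold preserves the length of the array.
theorem pv_fold_len (cs : List Char) (v : List Int) :
    (cs.foldl pvStepB v).length = v.length := by
  induction cs generalizing v with
  | nil => rfl
  | cons c rest ih => simp [List.foldl_cons, ih, pvStepB]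

-- pointwise value of B's frequency fold
theorem pv_fold_getD (cs : List Char)
    (h : ∀ c ∈ cs, c ∈ ['1','2','3','4','5','6','7','8','9'])
    (v : List Int) (hv : v.length = 9) (j : Nat) (hj : j < 9) :
    (cs.foldl pvStepB v).getD j 0
      = v.getD j 0 + (cs.count (pvDigitsB.getD j '?') : Int) := by
  induction cs generalizing v with
  | nil => simp
  | cons c rest ih =>
      have hc := h c (by simp)
      have f1 : PySem.Chars.find pvDigitsB ['1'] = 0 := by decide
      have f2 : PySem.Chars.find pvDigitsB ['2'] = 1 := by decide
      have f3 : PySem.Chars.find pvDigitsB ['3'] = 2 := by decide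
      have f4 : PySem.Chars.find pvDigitsB ['4'] = 3 := by decide
      have f5 : PySem.Chars.find pvDigitsB ['5'] = 4 := by decide
      have f6 : PySem.Chars.find pvDigitsB ['6'] = 5 := by decide
      have f7 : PySem.Chars.find pvDigitsB ['7'] = 6 := by decide
      have f8 : PySem.Chars.find pvDigitsB ['8'] = 7 := by decide
      have f9 : PySem.Chars.find pvDigitsB ['9'] = 8 := by decide
      have hstep : (pvStepB v c).getD j 0
          = v.getD j 0 + (if pvDigitsB.getD j '?' = c then (1 : Int) else 0) := by
        fin_cases hc <;>
          · simp only [pvStepB, f1, f2, f3, f4, f5, f6, f7, f8, f9]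
            interval_cases j <;>
              simp [PySem.List.pyGet?, PySem.List.pyIdx?, hv, List.getD, pvDigitsB]
      rw [List.foldl_cons, ih (fun x hx => h x (by simp [hx])) _ (by simp [pvStepB, hv]) ]
      rw [hstep, List.count_cons]
      by_cases hcd : pvDigitsB.getD j '?' = c
      · simp only [List.getD] at hcd ⊢
        simp [hcd]
        ring
      · have h2 : ¬ c = pvDigitsB.getD j '?' := fun hh => hcd hh.symm
        simp only [List.getD] at hcd h2 ⊢
        simp [hcd, h2]

-- ''.join of n copies of a one-char string is the n-fold replicated string
theorem pv_join_replicate (n : Nat) (c : Char) :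
    PySem.Str.join "" (List.replicate n (String.ofList [c]))
      = String.ofList (List.replicate n c) := by
  apply String.ext
  simp only [PySem.Str.toList_join]
  have h : ("" : String).toList = [] := rfl
  rw [h, pv_chars_join_nil]
  induction n with
  | zero => rfl
  | succ m ih => simp_all [List.replicate_succ, String.toList_ofList]

-- count of a mapped letter in A's list = count of its digit char
theorem pv_count_mapped (cs : List Char)
    (h : ∀ c ∈ cs, c ∈ ['1','2','3','4','5','6','7','8','9'])
    (d : Char) (hd : d ∈ ['1','2','3','4','5','6','7','8','9']) :
    (cs.map (fun c => ((pvCharMapA.get? c).getD ""))).count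
        ((pvCharMapA.get? d).getD "") = cs.count d := by
  rw [List.count_eq_countP, List.countP_map, List.count_eq_countP]
  refine List.countP_congr ?_
  intro x hx
  have hc := h x hx
  fin_cases hd <;> fin_cases hc <;> simp_all <;> decide

-- ===== VERDICT (by name: the statement is the Claim_ definition above) =====
set_option maxHeartbeats 1600000 in
theorem convert_and_sort_spec : Claim_equal_convert_and_sort := by
  intro N _ hPre
  have hPre' : ∀ c ∈ PySem.Int.toChars N, c ∈ ['1','2','3','4','5','6','7','8','9'] := by
    simpa [Pre_convert_and_sort] using hPre
  unfold Spec_convert_and_sort convert_and_sort convert_and_sort_alt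
  set cs := PySem.Int.toChars N with hcs
  dsimp only
  -- A's side: sorted = counting blocks over the alphabet
  rw [pv_sorted_eq _ (by
    intro x hx
    obtain ⟨c, hc, rfl⟩ := List.mem_map.mp hx
    exact pv_map_mem c (hPre' c hc))]
  rw [pv_join_flatMap]
  -- B's side: read off the fold's counts
  have hlen : (cs.foldl pvStepB (List.replicate 9 0)).length = 9 := by
    simp [pv_fold_len]
  have hget : ∀ j : Nat, j < 9 →
      (PySem.List.pyGet? (cs.foldl pvStepB (List.replicate 9 0)) (j : Int)).getD 0
        = (cs.count (pvDigitsB.getD j '?') : Int) := by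
    intro j hj
    rw [PySem.List.pyGet?_natCast]
    have := pv_fold_getD cs hPre' (List.replicate 9 0) (by simp) j hj
    simp only [List.getD_eq_getElem?_getD] at this ⊢
    interval_cases j <;> simpa using this
  have h0 := hget 0 (by omega); have h1 := hget 1 (by omega)
  have h2 := hget 2 (by omega); have h3 := hget 3 (by omega)
  have h4 := hget 4 (by omega); have h5 := hget 5 (by omega)
  have h6 := hget 6 (by omega); have h7 := hget 7 (by omega)
  have h8 := hget 8 (by omega)
  have hrange : PySem.List.pyRange 0 9 1
      = [(0:Int),1,2,3,4,5,6,7,8] := by decide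
  simp only [hrange, List.map_cons, List.map_nil]
  norm_num only at h0 h1 h2 h3 h4 h5 h6 h7 h8 ⊢
  rw [h0, h1, h2, h3, h4, h5, h6, h7, h8]
  -- counts of mapped letters on A's side
  have hm : ∀ d ∈ ['1','2','3','4','5','6','7','8','9'],
      (cs.map (fun c => ((pvCharMapA.get? c).getD ""))).count
        ((pvCharMapA.get? d).getD "") = cs.count d :=
    fun d hd => pv_count_mapped cs hPre' d hd
  have m1 := hm '1' (by decide); have m2 := hm '2' (by decide)
  have m3 := hm '3' (by decide); have m4 := hm '4' (by decide)
  have m5 := hm '5' (by decide); have m6 := hm '6' (by decide)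
  have m7 := hm '7' (by decide); have m8 := hm '8' (by decide)
  have m9 := hm '9' (by decide)
  simp only [pvLetters, List.map_cons, List.map_nil]
  norm_num only at m1 m2 m3 m4 m5 m6 m7 m8 m9
  simp only [show ((pvCharMapA.get? '1').getD "") = "A" from rfl,
             show ((pvCharMapA.get? '2').getD "") = "B" from rfl,
             show ((pvCharMapA.get? '3').getD "") = "C" from rfl,
             show ((pvCharMapA.get? '4').getD "") = "D" from rfl,
             show ((pvCharMapA.get? '5').getD "") = "E" from rfl,
             show ((pvCharMapA.get? '6').getD "") = "F" from rfl,
             show ((pvCharMapA.get? '7').getD "") = "G" from rfl,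
             show ((pvCharMapA.get? '8').getD "") = "H" from rfl,
             show ((pvCharMapA.get? '9').getD "") = "I" from rfl] at m1 m2 m3 m4 m5 m6 m7 m8 m9 ⊢
  rw [m1, m2, m3, m4, m5, m6, m7, m8, m9]
  simp only [show pvDigitsB.getD 0 '?' = '1' from rfl, show pvDigitsB.getD 1 '?' = '2' from rfl,
             show pvDigitsB.getD 2 '?' = '3' from rfl, show pvDigitsB.getD 3 '?' = '4' from rfl,
             show pvDigitsB.getD 4 '?' = '5' from rfl, show pvDigitsB.getD 5 '?' = '6' from rfl,
             show pvDigitsB.getD 6 '?' = '7' from rfl, show pvDigitsB.getD 7 '?' = '8' from rfl,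
             show pvDigitsB.getD 8 '?' = '9' from rfl, Int.toNat_natCast]
  rw [pv_join_replicate, pv_join_replicate, pv_join_replicate, pv_join_replicate,
      pv_join_replicate, pv_join_replicate, pv_join_replicate, pv_join_replicate,
      pv_join_replicate]
  rfl
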